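-- pv_equiv track=rewrite | github.com/Giovannibriglia/deep_forked | lib/rl_handler/src/data.py | _select_greedy_paths
-- ===== SOURCE A (Python) =====
-- from typing import Any, Callable, Dict, List, Optional, Sequence, Tuple
--
-- def _push_selected_path(
--     selected: List[str],
--     selected_set: set[str],
--     available_state_set: set[str],
--     path: str,
-- ) -> bool:
--     path_s = str(path).strip()
--     if not path_s or path_s in selected_set or path_s not in available_state_set:
--         return False
--     selected.append(path_s)
--     selected_set.add(path_s)
--     return True
--
-- def _select_greedy_paths(
--     expanded_node: str,
--     target_size: int,
--     expanded_state_order: Sequence[str],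
--     expanded_state_set: set[str],
--     open_state_order: Sequence[str],
--     open_state_set: set[str],
--     available_state_set: set[str],
--     parent_by_child: Dict[str, str],
--     children_by_parent: Dict[str, List[str]],
-- ) -> List[str]:
--     k = int(target_size)
--     if k <= 0:
--         return []
--
--     selected: List[str] = []
--     selected_set: set[str] = set()
--     expanded = str(expanded_node).strip()
--
--     parent = str(parent_by_child.get(expanded, "")).strip()
--     if parent:
--         for sibling in children_by_parent.get(parent, []):
--             sibling_s = str(sibling).strip()
--             if sibling_s == expanded:
--                 continue
--             _push_selected_path(selected, selected_set, available_state_set, sibling_s)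
--             if len(selected) >= k:
--                 return selected
--
--     visited_ancestors: set[str] = set()
--     current_ancestor = parent
--     while current_ancestor and current_ancestor not in visited_ancestors and len(selected) < k:
--         visited_ancestors.add(current_ancestor)
--         if current_ancestor in expanded_state_set:
--             _push_selected_path(selected, selected_set, available_state_set, current_ancestor)
--         if len(selected) >= k:
--             return selected
--         ancestor_parent = str(parent_by_child.get(current_ancestor, "")).strip()
--         if ancestor_parent:
--             for sibling in children_by_parent.get(ancestor_parent, []):
--                 sibling_s = str(sibling).strip()
--                 if sibling_s == current_ancestor or sibling_s not in expanded_state_set: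
--                     continue
--                 _push_selected_path(selected, selected_set, available_state_set, sibling_s)
--                 if len(selected) >= k:
--                     return selected
--         current_ancestor = ancestor_parent
--
--     for child in children_by_parent.get(expanded, []):
--         _push_selected_path(selected, selected_set, available_state_set, str(child))
--         if len(selected) >= k:
--             return selected
--
--     for path in reversed(open_state_order):
--         if path not in open_state_set:
--             continue
--         _push_selected_path(selected, selected_set, available_state_set, path)
--         if len(selected) >= k:
--             return selected
--
--     for path in reversed(expanded_state_order):
--         if path == expanded:
--             continue
--         _push_selected_path(selected, selected_set, available_state_set, path)
--         if len(selected) >= k: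
--             return selected
--     return selected
-- ===== SOURCE B (Python) =====
-- from typing import Dict, List, Sequence
--
-- def _select_greedy_paths(
--     expanded_node: str,
--     target_size: int,
--     expanded_state_order: Sequence[str],
--     expanded_state_set: set[str],
--     open_state_order: Sequence[str],
--     open_state_set: set[str],
--     available_state_set: set[str],
--     parent_by_child: Dict[str, str],
--     children_by_parent: Dict[str, List[str]],
-- ) -> List[str]:
--     k = int(target_size)
--     if k <= 0:
--         return []
--
--     expanded = str(expanded_node).strip()
--     parent = str(parent_by_child.get(expanded, "")).strip()
--
--     # The raw candidate stream in priority order (graph structure only; selection-independent).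
--     candidates: List[str] = []
--     if parent:
--         candidates += [str(s).strip() for s in children_by_parent.get(parent, [])
--                        if str(s).strip() != expanded]
--     visited_ancestors: set[str] = set()
--     cur = parent
--     while cur and cur not in visited_ancestors:
--         visited_ancestors.add(cur)
--         if cur in expanded_state_set:
--             candidates.append(cur)
--         ancestor_parent = str(parent_by_child.get(cur, "")).strip()
--         if ancestor_parent:
--             candidates += [str(s).strip() for s in children_by_parent.get(ancestor_parent, [])
--                            if str(s).strip() != cur and str(s).strip() in expanded_state_set]
--         cur = ancestor_parent
--     candidates += [str(c) for c in children_by_parent.get(expanded, [])]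
--     candidates += [p for p in reversed(open_state_order) if p in open_state_set]
--     candidates += [p for p in reversed(expanded_state_order) if p != expanded]
--
--     # Rank-and-sort selection: each available path gets the priority rank of its first
--     # occurrence in the stream; the answer is the k best-ranked paths.
--     stripped = [str(c).strip() for c in candidates]
--     rank_of: Dict[str, int] = {}
--     for i, s in enumerate(stripped):
--         rank_of.setdefault(s, i)
--     ranked: List[tuple] = []
--     for path in available_state_set:
--         if path and path in rank_of:
--             ranked.append((rank_of[path], path))
--     ranked.sort(key=lambda t: t[0])
--     return [p for _, p in ranked[:k]]
-- ===== Notes on version B (the rewrite author's own statement) =====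
-- stated objective: alternative
-- what changed: Replaces A's interleaved greedy push-until-k phases with rank-and-sort selection: a first-occurrence rank table over the stripped candidate stream, an inverted loop over the available set collecting (rank, path) pairs, then sort by rank and take the k best-ranked paths.
import Mathlib
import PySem

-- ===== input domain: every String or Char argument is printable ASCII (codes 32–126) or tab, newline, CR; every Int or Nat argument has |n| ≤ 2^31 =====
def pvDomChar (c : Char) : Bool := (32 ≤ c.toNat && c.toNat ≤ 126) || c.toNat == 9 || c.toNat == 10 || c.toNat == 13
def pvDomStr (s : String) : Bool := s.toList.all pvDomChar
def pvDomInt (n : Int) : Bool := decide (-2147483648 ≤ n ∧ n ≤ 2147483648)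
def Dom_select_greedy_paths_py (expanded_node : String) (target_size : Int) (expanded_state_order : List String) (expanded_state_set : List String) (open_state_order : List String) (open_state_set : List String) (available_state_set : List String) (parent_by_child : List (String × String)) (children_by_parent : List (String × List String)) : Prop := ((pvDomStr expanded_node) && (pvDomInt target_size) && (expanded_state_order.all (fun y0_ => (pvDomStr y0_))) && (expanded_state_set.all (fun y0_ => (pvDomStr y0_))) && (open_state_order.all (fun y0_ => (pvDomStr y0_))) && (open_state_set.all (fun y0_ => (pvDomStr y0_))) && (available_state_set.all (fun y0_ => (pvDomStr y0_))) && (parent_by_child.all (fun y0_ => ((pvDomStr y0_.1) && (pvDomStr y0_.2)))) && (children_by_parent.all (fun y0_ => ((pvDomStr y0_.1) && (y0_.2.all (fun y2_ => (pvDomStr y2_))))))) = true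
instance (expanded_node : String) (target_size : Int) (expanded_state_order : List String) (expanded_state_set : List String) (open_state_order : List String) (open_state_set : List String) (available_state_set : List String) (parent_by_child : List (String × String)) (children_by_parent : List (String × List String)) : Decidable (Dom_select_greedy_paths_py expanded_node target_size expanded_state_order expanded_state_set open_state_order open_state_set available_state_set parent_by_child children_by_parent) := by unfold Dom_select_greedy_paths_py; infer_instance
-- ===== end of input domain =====

-- B replaces A's interleaved greedy push-until-k phases with rank-and-sort selection (each available path gets the rank of its first valid occurrence in the candidate stream; sort by rank, take k); return value only, no observable mutation of the arguments.
-- ===== PORT A =====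
-- _push_selected_path (A's helper; returns the updated (selected, selected_set))
def pvPush (avail : List String) (sel : List String) (ss : PySem.Set String) (path : String) : List String × PySem.Set String :=
  let pathS := PySem.Str.strip path
  if pathS = "" ∨ pathS ∈ ss ∨ pathS ∉ avail then (sel, ss)
  else (sel ++ [pathS], PySem.Set.add ss pathS)

-- phase 1: siblings of expanded
def pvA_loop1 (k : Int) (avail : List String) (expanded : String) : List String → List String → PySem.Set String → List String × PySem.Set String × Bool
  | [], sel, ss => (sel, ss, false)
  | sib :: rest, sel, ss =>
    let sibS := PySem.Str.strip sib
    if sibS = expanded then pvA_loop1 k avail expanded rest sel ss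
    else
      let st := pvPush avail sel ss sibS
      if k ≤ (st.1.length : Int) then (st.1, st.2, true)
      else pvA_loop1 k avail expanded rest st.1 st.2

-- inner sibling loop of the ancestor while-loop
def pvA_sibs (k : Int) (avail : List String) (cur : String) (ess : List String) : List String → List String → PySem.Set String → List String × PySem.Set String × Bool
  | [], sel, ss => (sel, ss, false)
  | sib :: rest, sel, ss =>
    let sibS := PySem.Str.strip sib
    if sibS = cur ∨ sibS ∉ ess then pvA_sibs k avail cur ess rest sel ss
    else
      let st := pvPush avail sel ss sibS
      if k ≤ (st.1.length : Int) then (st.1, st.2, true)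
      else pvA_sibs k avail cur ess rest st.1 st.2

-- the ancestor while-loop (fuel only makes the loop total; pbc.length + 2 iterations always suffice because each iteration's ancestor is fresh w.r.t. visited and drawn from pbc's values)
def pvA_anc (k : Int) (avail : List String) (ess : List String) (pbc : List (String × String)) (cbp : List (String × List String)) : Nat → PySem.Set String → String → List String → PySem.Set String → List String × PySem.Set String × Bool
  | 0, _, _, sel, ss => (sel, ss, false)
  | fuel + 1, visited, cur, sel, ss =>
    if cur = "" ∨ cur ∈ visited ∨ k ≤ (sel.length : Int) then (sel, ss, false)
    else
      let visited' := PySem.Set.add visited cur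
      let st1 := if cur ∈ ess then pvPush avail sel ss cur else (sel, ss)
      if k ≤ (st1.1.length : Int) then (st1.1, st1.2, true)
      else
        let ap := PySem.Str.strip ((PySem.Dict.mk pbc).getD cur "")
        let st2 :=
          if ap = "" then (st1.1, st1.2, false)
          else pvA_sibs k avail cur ess ((PySem.Dict.mk cbp).getD ap []) st1.1 st1.2
        if st2.2.2 then (st2.1, st2.2.1, true)
        else pvA_anc k avail ess pbc cbp fuel visited' ap st2.1 st2.2.1

-- phase 3: children of expanded
def pvA_children (k : Int) (avail : List String) : List String → List String → PySem.Set String → List String × PySem.Set String × Bool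
  | [], sel, ss => (sel, ss, false)
  | c :: rest, sel, ss =>
    let st := pvPush avail sel ss c
    if k ≤ (st.1.length : Int) then (st.1, st.2, true)
    else pvA_children k avail rest st.1 st.2

-- phase 4: reversed open_state_order filtered by open_state_set (caller passes the reversed list)
def pvA_open (k : Int) (avail : List String) (oss : List String) : List String → List String → PySem.Set String → List String × PySem.Set String × Bool
  | [], sel, ss => (sel, ss, false)
  | p :: rest, sel, ss =>
    if p ∉ oss then pvA_open k avail oss rest sel ss
    else
      let st := pvPush avail sel ss p
      if k ≤ (st.1.length : Int) then (st.1, st.2, true)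
      else pvA_open k avail oss rest st.1 st.2

-- phase 5: reversed expanded_state_order, skipping expanded
def pvA_exp (k : Int) (avail : List String) (expanded : String) : List String → List String → PySem.Set String → List String × PySem.Set String × Bool
  | [], sel, ss => (sel, ss, false)
  | p :: rest, sel, ss =>
    if p = expanded then pvA_exp k avail expanded rest sel ss
    else
      let st := pvPush avail sel ss p
      if k ≤ (st.1.length : Int) then (st.1, st.2, true)
      else pvA_exp k avail expanded rest st.1 st.2

def select_greedy_paths_py (expanded_node : String) (target_size : Int) (expanded_state_order : List String) (expanded_state_set : List String) (open_state_order : List String) (open_state_set : List String) (available_state_set : List String) (parent_by_child : List (String × String)) (children_by_parent : List (String × List String)) : List String :=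
  let k := target_size
  if k ≤ 0 then []
  else
    let expanded := PySem.Str.strip expanded_node
    let parent := PySem.Str.strip ((PySem.Dict.mk parent_by_child).getD expanded "")
    let r0 :=
      if parent ≠ "" then
        pvA_loop1 k available_state_set expanded ((PySem.Dict.mk children_by_parent).getD parent []) [] PySem.Set.empty
      else ([], PySem.Set.empty, false)
    if r0.2.2 then r0.1
    else
      let r1 := pvA_anc k available_state_set expanded_state_set parent_by_child children_by_parent (parent_by_child.length + 2) PySem.Set.empty parent r0.1 r0.2.1
      if r1.2.2 then r1.1
      else
        let r2 := pvA_children k available_state_set ((PySem.Dict.mk children_by_parent).getD expanded []) r1.1 r1.2.1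
        if r2.2.2 then r2.1
        else
          let r3 := pvA_open k available_state_set open_state_set open_state_order.reverse r2.1 r2.2.1
          if r3.2.2 then r3.1
          else
            (pvA_exp k available_state_set expanded expanded_state_order.reverse r3.1 r3.2.1).1

-- ===== PORT B =====
-- candidate segment contributed by the ancestor while-loop (same totalising fuel as A's loop)
def pvB_cands (ess : List String) (pbc : List (String × String)) (cbp : List (String × List String)) : Nat → PySem.Set String → String → List String
  | 0, _, _ => []
  | fuel + 1, visited, cur =>
    if cur = "" ∨ cur ∈ visited then []
    else
      let visited' := PySem.Set.add visited cur
      let here := if cur ∈ ess then [cur] else []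
      let ap := PySem.Str.strip ((PySem.Dict.mk pbc).getD cur "")
      let sibs :=
        if ap = "" then []
        else (((PySem.Dict.mk cbp).getD ap []).map PySem.Str.strip).filter (fun s => decide (s ≠ cur ∧ s ∈ ess))
      here ++ sibs ++ pvB_cands ess pbc cbp fuel visited' ap

-- B's first-occurrence rank table ('rank_of.setdefault(s, i)' over enumerate(stripped))
def pvB_rankOf (stripped : List String) : PySem.Dict String Int :=
  (PySem.List.enumerate stripped).foldl (fun d t => d.setdefault t.2 t.1) PySem.Dict.empty

-- B's ranking loop: for each available path, its rank if the table holds one ('if path and path in rank_of: append((rank_of[path], path))' — membership and lookup combined in one get?)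
def pvB_rank (avail : List String) (stripped : List String) : List (Int × String) :=
  (PySem.Set.ofList avail).filterMap (fun path =>
    if path = "" then none
    else match (pvB_rankOf stripped).get? path with
      | none => none
      | some i => some (i, path))

def select_greedy_paths_py_alt (expanded_node : String) (target_size : Int) (expanded_state_order : List String) (expanded_state_set : List String) (open_state_order : List String) (open_state_set : List String) (available_state_set : List String) (parent_by_child : List (String × String)) (children_by_parent : List (String × List String)) : List String :=
  if target_size ≤ 0 then []
  else
    let expanded := PySem.Str.strip expanded_node
    let parent := PySem.Str.strip ((PySem.Dict.mk parent_by_child).getD expanded "")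
    let candidates :=
      (if parent ≠ "" then
        (((PySem.Dict.mk children_by_parent).getD parent []).map PySem.Str.strip).filter (fun s => decide (s ≠ expanded))
       else [])
      ++ pvB_cands expanded_state_set parent_by_child children_by_parent (parent_by_child.length + 2) PySem.Set.empty parent
      ++ (PySem.Dict.mk children_by_parent).getD expanded []
      ++ open_state_order.reverse.filter (fun p => decide (p ∈ open_state_set))
      ++ expanded_state_order.reverse.filter (fun p => decide (p ≠ expanded))
    let ranked := pvB_rank available_state_set (candidates.map PySem.Str.strip)
    ((PySem.List.sorted ranked (fun t => t.1)).take target_size.toNat).map (fun t => t.2)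

-- ===== PRECONDITION & SPEC =====
def Spec_select_greedy_paths_py (expanded_node : String) (target_size : Int) (expanded_state_order : List String) (expanded_state_set : List String) (open_state_order : List String) (open_state_set : List String) (available_state_set : List String) (parent_by_child : List (String × String)) (children_by_parent : List (String × List String)) (out : List String) : Prop := out = select_greedy_paths_py_alt expanded_node target_size expanded_state_order expanded_state_set open_state_order open_state_set available_state_set parent_by_child children_by_parent
instance (expanded_node : String) (target_size : Int) (expanded_state_order : List String) (expanded_state_set : List String) (open_state_order : List String) (open_state_set : List String) (available_state_set : List String) (parent_by_child : List (String × String)) (children_by_parent : List (String × List String)) (out : List String) : Decidable (Spec_select_greedy_paths_py expanded_node target_size expanded_state_order expanded_state_set open_state_order open_state_set available_state_set parent_by_child children_by_parent out) := by unfold Spec_select_greedy_paths_py; infer_instance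

-- ===== CLAIM (what is proved, stated in full; the proofs are below) =====
def Claim_equal_select_greedy_paths_py : Prop := ∀ (expanded_node : String) (target_size : Int) (expanded_state_order : List String) (expanded_state_set : List String) (open_state_order : List String) (open_state_set : List String) (available_state_set : List String) (parent_by_child : List (String × String)) (children_by_parent : List (String × List String)), Dom_select_greedy_paths_py expanded_node target_size expanded_state_order expanded_state_set open_state_order open_state_set available_state_set parent_by_child children_by_parent → Spec_select_greedy_paths_py expanded_node target_size expanded_state_order expanded_state_set open_state_order open_state_set available_state_set parent_by_child children_by_parent (select_greedy_paths_py expanded_node target_size expanded_state_order expanded_state_set open_state_order open_state_set available_state_set parent_by_child children_by_parent)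

-- ===== LEMMAS AND PROOFS =====

-- proof-side bridge: the flat greedy selection loop over the whole candidate stream
def pvB_sel (k : Int) (avail : List String) : List String → List String → PySem.Set String → List String × PySem.Set String × Bool
  | [], sel, ss => (sel, ss, false)
  | c :: cs, sel, ss =>
    let st := pvPush avail sel ss c
    if k ≤ (st.1.length : Int) then (st.1, st.2, true)
    else pvB_sel k avail cs st.1 st.2

-- proof-side bridge: the valid-and-first-occurrence subsequence of the candidate stream
def pvDedup (avail : List String) : PySem.Set String → List String → List String
  | _, [] => []
  | ss, c :: cs =>
    let s := PySem.Str.strip c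
    if s = "" ∨ s ∈ ss ∨ s ∉ avail then pvDedup avail ss cs
    else s :: pvDedup avail (PySem.Set.add ss s) cs

theorem pvB_sel_append (k : Int) (avail : List String) (xs ys : List String) (sel : List String) (ss : PySem.Set String) :
    pvB_sel k avail (xs ++ ys) sel ss =
      (if (pvB_sel k avail xs sel ss).2.2 then pvB_sel k avail xs sel ss
       else pvB_sel k avail ys (pvB_sel k avail xs sel ss).1 (pvB_sel k avail xs sel ss).2.1) := by
  induction xs generalizing sel ss with
  | nil => simp [pvB_sel]
  | cons c cs ih =>
    simp only [List.cons_append, pvB_sel]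
    by_cases h : k ≤ ((pvPush avail sel ss c).1.length : Int)
    · simp [h]
    · simp only [if_neg h]
      exact ih _ _

theorem pvB_sel_false_lt (k : Int) (avail : List String) (xs : List String) (sel : List String) (ss : PySem.Set String)
    (hf : (pvB_sel k avail xs sel ss).2.2 = false) (h : (sel.length : Int) < k) :
    (((pvB_sel k avail xs sel ss).1.length : Int)) < k := by
  induction xs generalizing sel ss with
  | nil => simpa [pvB_sel] using h
  | cons c cs ih =>
    simp only [pvB_sel] at hf ⊢
    by_cases hk : k ≤ ((pvPush avail sel ss c).1.length : Int)
    · rw [if_pos hk] at hf; simp at hf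
    · rw [if_neg hk] at hf ⊢
      exact ih _ _ hf (by omega)

theorem pvA_loop1_eq (k : Int) (avail : List String) (expanded : String) (sibs : List String) (sel : List String) (ss : PySem.Set String) :
    pvA_loop1 k avail expanded sibs sel ss =
      pvB_sel k avail ((sibs.map PySem.Str.strip).filter (fun s => decide (s ≠ expanded))) sel ss := by
  induction sibs generalizing sel ss with
  | nil => simp [pvA_loop1, pvB_sel]
  | cons sib rest ih =>
    simp only [List.map_cons, List.filter_cons]
    by_cases h : PySem.Str.strip sib = expanded
    · simp only [pvA_loop1, h]; simp [ih]
    · simp only [pvA_loop1, h]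
      simp only [ne_eq, h, not_false_eq_true, decide_true, if_true, if_false, pvB_sel]
      by_cases hk : k ≤ (((pvPush avail sel ss (PySem.Str.strip sib)).1.length : Int))
      · rw [if_pos hk, if_pos hk]
      · rw [if_neg hk, if_neg hk]; exact ih _ _

theorem pvA_sibs_eq (k : Int) (avail : List String) (cur : String) (ess : List String) (sibs : List String) (sel : List String) (ss : PySem.Set String) :
    pvA_sibs k avail cur ess sibs sel ss =
      pvB_sel k avail ((sibs.map PySem.Str.strip).filter (fun s => decide (s ≠ cur ∧ s ∈ ess))) sel ss := by
  induction sibs generalizing sel ss with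
  | nil => simp [pvA_sibs, pvB_sel]
  | cons sib rest ih =>
    simp only [List.map_cons, List.filter_cons]
    by_cases h : PySem.Str.strip sib = cur ∨ PySem.Str.strip sib ∉ ess
    · have h' : (decide (PySem.Str.strip sib ≠ cur ∧ PySem.Str.strip sib ∈ ess)) = false := by
        simp only [decide_eq_false_iff_not]; tauto
      simp only [pvA_sibs, if_pos h, h', Bool.false_eq_true, if_false]
      exact ih _ _
    · have h' : (decide (PySem.Str.strip sib ≠ cur ∧ PySem.Str.strip sib ∈ ess)) = true := by
        simp only [decide_eq_true_eq]; tauto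
      simp only [pvA_sibs, if_neg h, h', if_true, pvB_sel]
      by_cases hk : k ≤ (((pvPush avail sel ss (PySem.Str.strip sib)).1.length : Int))
      · rw [if_pos hk, if_pos hk]
      · rw [if_neg hk, if_neg hk]; exact ih _ _

theorem pvA_children_eq (k : Int) (avail : List String) (cs : List String) (sel : List String) (ss : PySem.Set String) :
    pvA_children k avail cs sel ss = pvB_sel k avail cs sel ss := by
  induction cs generalizing sel ss with
  | nil => simp [pvA_children, pvB_sel]
  | cons c rest ih =>
    simp only [pvA_children, pvB_sel]
    by_cases hk : k ≤ ((pvPush avail sel ss c).1.length : Int)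
    · rw [if_pos hk, if_pos hk]
    · rw [if_neg hk, if_neg hk]; exact ih _ _

theorem pvA_open_eq (k : Int) (avail : List String) (oss : List String) (ps : List String) (sel : List String) (ss : PySem.Set String) :
    pvA_open k avail oss ps sel ss =
      pvB_sel k avail (ps.filter (fun p => decide (p ∈ oss))) sel ss := by
  induction ps generalizing sel ss with
  | nil => simp [pvA_open, pvB_sel]
  | cons p rest ih =>
    simp only [List.filter_cons]
    by_cases h : p ∈ oss
    · simp only [pvA_open, h, not_true_eq_false, if_false, decide_true, if_true, pvB_sel]
      by_cases hk : k ≤ ((pvPush avail sel ss p).1.length : Int)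
      · rw [if_pos hk, if_pos hk]
      · rw [if_neg hk, if_neg hk]; exact ih _ _
    · simp only [pvA_open, h, not_false_eq_true, if_true, decide_false, Bool.false_eq_true, if_false]
      exact ih _ _

theorem pvA_exp_eq (k : Int) (avail : List String) (expanded : String) (ps : List String) (sel : List String) (ss : PySem.Set String) :
    pvA_exp k avail expanded ps sel ss =
      pvB_sel k avail (ps.filter (fun p => decide (p ≠ expanded))) sel ss := by
  induction ps generalizing sel ss with
  | nil => simp [pvA_exp, pvB_sel]
  | cons p rest ih =>
    simp only [List.filter_cons]
    by_cases h : p = expanded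
    · simp only [pvA_exp, h]; simp [ih]
    · simp only [pvA_exp, h]
      simp only [ne_eq, h, not_false_eq_true, decide_true, if_true, if_false, pvB_sel]
      by_cases hk : k ≤ ((pvPush avail sel ss p).1.length : Int)
      · rw [if_pos hk, if_pos hk]
      · rw [if_neg hk, if_neg hk]; exact ih _ _

theorem pvA_anc_step (k : Int) (avail ess : List String) (pbc : List (String × String)) (cbp : List (String × List String))
    (fuel : Nat) (visited' : PySem.Set String) (cur ap : String) (sel : List String) (ss : PySem.Set String)
    (hst : (sel.length : Int) < k)
    (ih : ∀ (v : PySem.Set String) (c : String) (s : List String) (t : PySem.Set String), (s.length : Int) < k →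
      pvA_anc k avail ess pbc cbp fuel v c s t = pvB_sel k avail (pvB_cands ess pbc cbp fuel v c) s t) :
    (if (if ap = "" then (sel, ss, false) else pvA_sibs k avail cur ess ((PySem.Dict.mk cbp).getD ap []) sel ss).2.2 then
       ((if ap = "" then (sel, ss, false) else pvA_sibs k avail cur ess ((PySem.Dict.mk cbp).getD ap []) sel ss).1,
        (if ap = "" then (sel, ss, false) else pvA_sibs k avail cur ess ((PySem.Dict.mk cbp).getD ap []) sel ss).2.1, true)
     else pvA_anc k avail ess pbc cbp fuel visited' ap
       (if ap = "" then (sel, ss, false) else pvA_sibs k avail cur ess ((PySem.Dict.mk cbp).getD ap []) sel ss).1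
       (if ap = "" then (sel, ss, false) else pvA_sibs k avail cur ess ((PySem.Dict.mk cbp).getD ap []) sel ss).2.1) =
    pvB_sel k avail
      ((if ap = "" then []
        else (((PySem.Dict.mk cbp).getD ap []).map PySem.Str.strip).filter (fun s => decide (s ≠ cur ∧ s ∈ ess)))
       ++ pvB_cands ess pbc cbp fuel visited' ap) sel ss := by
  have hst2 : (if ap = "" then (sel, ss, false) else pvA_sibs k avail cur ess ((PySem.Dict.mk cbp).getD ap []) sel ss) =
      pvB_sel k avail (if ap = "" then []
        else (((PySem.Dict.mk cbp).getD ap []).map PySem.Str.strip).filter (fun s => decide (s ≠ cur ∧ s ∈ ess))) sel ss := by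
    by_cases hap : ap = ""
    · simp [hap, pvB_sel]
    · simp [hap, pvA_sibs_eq]
  rw [hst2, pvB_sel_append]
  rcases hB : pvB_sel k avail (if ap = "" then []
        else (((PySem.Dict.mk cbp).getD ap []).map PySem.Str.strip).filter (fun s => decide (s ≠ cur ∧ s ∈ ess))) sel ss
    with ⟨s2, t2, d2⟩
  cases d2 with
  | true => simp
  | false =>
    simp only [Bool.false_eq_true, if_false]
    have hlt : ((s2.length : Int)) < k := by
      have := pvB_sel_false_lt k avail _ sel ss (by rw [hB]) hst
      rw [hB] at this; exact this
    exact ih _ _ _ _ hlt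

theorem pvA_anc_eq (k : Int) (avail : List String) (ess : List String) (pbc : List (String × String)) (cbp : List (String × List String))
    (fuel : Nat) (visited : PySem.Set String) (cur : String) (sel : List String) (ss : PySem.Set String)
    (h : (sel.length : Int) < k) :
    pvA_anc k avail ess pbc cbp fuel visited cur sel ss =
      pvB_sel k avail (pvB_cands ess pbc cbp fuel visited cur) sel ss := by
  induction fuel generalizing visited cur sel ss with
  | zero => simp [pvA_anc, pvB_cands, pvB_sel]
  | succ fuel ih =>
    simp only [pvA_anc, pvB_cands]
    by_cases h0 : cur = "" ∨ cur ∈ visited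
    · have hg : cur = "" ∨ cur ∈ visited ∨ k ≤ (sel.length : Int) := by tauto
      simp [hg, h0, pvB_sel]
    · have hg : ¬ (cur = "" ∨ cur ∈ visited ∨ k ≤ (sel.length : Int)) := by
        rcases not_or.mp h0 with ⟨ha, hb⟩
        exact not_or.mpr ⟨ha, not_or.mpr ⟨hb, by omega⟩⟩
      rw [if_neg hg, if_neg h0]
      by_cases he : cur ∈ ess
      · simp only [he, if_true, List.cons_append, pvB_sel]
        by_cases hk : k ≤ ((pvPush avail sel ss cur).1.length : Int)
        · rw [if_pos hk, if_pos hk]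
        · rw [if_neg hk, if_neg hk]
          exact pvA_anc_step k avail ess pbc cbp fuel _ cur _ _ _ (by omega) ih
      · simp only [he, if_false, List.nil_append]
        rw [if_neg (show ¬ k ≤ (((sel, ss).1.length : Int)) by simp; omega)]
        exact pvA_anc_step k avail ess pbc cbp fuel _ cur _ _ _ (by simpa using h) ih

-- A equals the flat greedy loop over the concatenated candidate stream
theorem pvA_eq_sel (expanded_node : String) (k : Int) (eso ess oso oss avs : List String) (pbc : List (String × String)) (cbp : List (String × List String)) (hk : ¬ k ≤ 0) :
    select_greedy_paths_py expanded_node k eso ess oso oss avs pbc cbp =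
      (pvB_sel k avs
        ((if PySem.Str.strip ((PySem.Dict.mk pbc).getD (PySem.Str.strip expanded_node) "") ≠ "" then
            (((PySem.Dict.mk cbp).getD (PySem.Str.strip ((PySem.Dict.mk pbc).getD (PySem.Str.strip expanded_node) "")) []).map PySem.Str.strip).filter (fun s => decide (s ≠ PySem.Str.strip expanded_node))
          else [])
        ++ pvB_cands ess pbc cbp (pbc.length + 2) PySem.Set.empty (PySem.Str.strip ((PySem.Dict.mk pbc).getD (PySem.Str.strip expanded_node) ""))
        ++ (PySem.Dict.mk cbp).getD (PySem.Str.strip expanded_node) []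
        ++ oso.reverse.filter (fun p => decide (p ∈ oss))
        ++ eso.reverse.filter (fun p => decide (p ≠ PySem.Str.strip expanded_node)))
        [] PySem.Set.empty).1 := by
  simp only [select_greedy_paths_py, if_neg hk]
  set expanded := PySem.Str.strip expanded_node with hexp
  set parent := PySem.Str.strip ((PySem.Dict.mk pbc).getD expanded "") with hpar
  set c1 := (if parent ≠ "" then
      (((PySem.Dict.mk cbp).getD parent []).map PySem.Str.strip).filter (fun s => decide (s ≠ expanded))
    else ([] : List String)) with hc1
  set c2 := pvB_cands ess pbc cbp (pbc.length + 2) PySem.Set.empty parent with hc2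
  set c3 := (PySem.Dict.mk cbp).getD expanded [] with hc3
  set c4 := oso.reverse.filter (fun p => decide (p ∈ oss)) with hc4
  set c5 := eso.reverse.filter (fun p => decide (p ≠ expanded)) with hc5
  have hr0 : (if parent ≠ "" then
        pvA_loop1 k avs expanded ((PySem.Dict.mk cbp).getD parent []) [] PySem.Set.empty
      else ([], PySem.Set.empty, false)) = pvB_sel k avs c1 [] PySem.Set.empty := by
    by_cases hp : parent ≠ "" <;> simp [hc1, hp, pvA_loop1_eq, pvB_sel]
  rw [hr0]
  simp only [List.append_assoc]
  rw [pvB_sel_append]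
  rcases h1 : pvB_sel k avs c1 [] PySem.Set.empty with ⟨s1, t1, d1⟩
  cases d1 with
  | true => simp
  | false =>
    simp only [Bool.false_eq_true, if_false]
    have l1 : ((s1.length : Int)) < k := by
      have := pvB_sel_false_lt k avs c1 [] PySem.Set.empty (by rw [h1]) (by simp; omega)
      rw [h1] at this; exact this
    rw [pvA_anc_eq k avs ess pbc cbp _ _ _ _ _ l1, pvB_sel_append]
    rcases h2 : pvB_sel k avs c2 s1 t1 with ⟨s2, t2, d2⟩
    cases d2 with
    | true => simp
    | false =>
      simp only [Bool.false_eq_true, if_false]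
      rw [pvA_children_eq, pvB_sel_append]
      rcases h3 : pvB_sel k avs c3 s2 t2 with ⟨s3, t3, d3⟩
      cases d3 with
      | true => simp
      | false =>
        simp only [Bool.false_eq_true, if_false]
        rw [pvA_open_eq, pvB_sel_append]
        rcases h4 : pvB_sel k avs c4 s3 t3 with ⟨s4, t4, d4⟩
        cases d4 with
        | true => simp
        | false =>
          simp only [Bool.false_eq_true, if_false]
          rw [pvA_exp_eq]

-- the greedy loop's output is the k-prefix of the valid first-occurrence subsequence
theorem pvB_sel_eq_dedup (k : Int) (avail : List String) (cs : List String) (sel : List String) (ss : PySem.Set String)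
    (h : (sel.length : Int) < k) :
    (pvB_sel k avail cs sel ss).1 = sel ++ (pvDedup avail ss cs).take (k - sel.length).toNat := by
  induction cs generalizing sel ss with
  | nil =>
    simp [pvB_sel, pvDedup]
  | cons c cs ih =>
    simp only [pvB_sel, pvDedup, pvPush]
    by_cases hv : PySem.Str.strip c = "" ∨ PySem.Str.strip c ∈ ss ∨ PySem.Str.strip c ∉ avail
    · simp only [if_pos hv]
      rw [if_neg (by simpa using (by omega : ¬ k ≤ (sel.length : Int)))]
      exact ih sel ss h
    · simp only [if_neg hv]
      by_cases hk : k ≤ (((sel ++ [PySem.Str.strip c]).length : Int))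
      · rw [if_pos (by simpa using hk)]
        have h1 : (k - (sel.length : Int)).toNat = 1 := by
          simp at hk; omega
        simp [h1]
      · rw [if_neg (by simpa using hk)]
        rw [ih (sel ++ [PySem.Str.strip c]) (PySem.Set.add ss (PySem.Str.strip c)) (by simp at hk ⊢; omega)]
        have h2 : (k - (sel.length : Int)).toNat = (k - ((sel ++ [PySem.Str.strip c]).length : Int)).toNat + 1 := by
          simp at hk ⊢; omega
        simp [h2, List.take_succ_cons, List.append_assoc]

theorem pvDedup_mem (avail : List String) (cs : List String) (ss : PySem.Set String) (p : String) :
    p ∈ pvDedup avail ss cs ↔ p ∈ cs.map PySem.Str.strip ∧ p ∉ ss ∧ p ≠ "" ∧ p ∈ avail := by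
  induction cs generalizing ss with
  | nil => simp [pvDedup]
  | cons c cs ih =>
    simp only [pvDedup, List.map_cons, List.mem_cons]
    by_cases hv : PySem.Str.strip c = "" ∨ PySem.Str.strip c ∈ ss ∨ PySem.Str.strip c ∉ avail
    · rw [if_pos hv, ih]
      constructor
      · rintro ⟨hm, hns, hne, hav⟩; exact ⟨Or.inr hm, hns, hne, hav⟩
      · rintro ⟨hm, hns, hne, hav⟩
        rcases hm with he | hm
        · exfalso; subst he; tauto
        · exact ⟨hm, hns, hne, hav⟩
    · rcases not_or.mp hv with ⟨hne, h2⟩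
      rcases not_or.mp h2 with ⟨hns, hav'⟩
      have hav := not_not.mp hav'
      rw [if_neg hv, List.mem_cons, ih]
      simp only [PySem.Set.mem_add]
      constructor
      · rintro (he | ⟨hm, hns2, hne2, hav2⟩)
        · subst he; exact ⟨Or.inl rfl, hns, hne, hav⟩
        · exact ⟨Or.inr hm, fun hin => hns2 (Or.inl hin), hne2, hav2⟩
      · rintro ⟨he | hm, hns2, hne2, hav2⟩
        · exact Or.inl he
        · by_cases hps : p = PySem.Str.strip c
          · exact Or.inl hps
          · exact Or.inr ⟨hm, by tauto, hne2, hav2⟩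

theorem pvDedup_nodup (avail : List String) (cs : List String) (ss : PySem.Set String) :
    (pvDedup avail ss cs).Nodup := by
  induction cs generalizing ss with
  | nil => simp [pvDedup]
  | cons c cs ih =>
    simp only [pvDedup]
    split
    · exact ih ss
    · refine List.Nodup.cons ?_ (ih _)
      intro hmem
      have := (pvDedup_mem avail cs (PySem.Set.add ss (PySem.Str.strip c)) _).mp hmem
      exact this.2.1 ((PySem.Set.mem_add ss _ _).mpr (Or.inr rfl))

theorem pvDedup_pairwise (avail : List String) (cs : List String) (ss : PySem.Set String) :
    (pvDedup avail ss cs).Pairwise (fun a b => ∃ i j,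
      PySem.List.index? (cs.map PySem.Str.strip) a = some i ∧
      PySem.List.index? (cs.map PySem.Str.strip) b = some j ∧ i < j) := by
  induction cs generalizing ss with
  | nil => simp [pvDedup]
  | cons c cs ih =>
    simp only [pvDedup, List.map_cons]
    by_cases hv : PySem.Str.strip c = "" ∨ PySem.Str.strip c ∈ ss ∨ PySem.Str.strip c ∉ avail
    · rw [if_pos hv]
      refine (ih ss).imp_of_mem ?_
      intro a b ha hb ⟨i, j, hia, hjb, hij⟩
      have hmema := (pvDedup_mem avail cs ss a).mp ha
      have hmemb := (pvDedup_mem avail cs ss b).mp hb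
      have hna : PySem.Str.strip c ≠ a := by rintro rfl; tauto
      have hnb : PySem.Str.strip c ≠ b := by rintro rfl; tauto
      refine ⟨i + 1, j + 1, ?_, ?_, by omega⟩
      · rw [PySem.List.index?_cons_of_ne _ hna, hia]; rfl
      · rw [PySem.List.index?_cons_of_ne _ hnb, hjb]; rfl
    · rw [if_neg hv]
      refine List.Pairwise.cons ?_ ?_
      · intro b hb
        have hmemb := (pvDedup_mem avail cs (PySem.Set.add ss (PySem.Str.strip c)) b).mp hb
        have hnb : PySem.Str.strip c ≠ b := by
          rintro rfl
          exact hmemb.2.1 ((PySem.Set.mem_add ss _ _).mpr (Or.inr rfl))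
        obtain ⟨j, hj⟩ := Option.isSome_iff_exists.mp
          ((PySem.List.index?_isSome_iff (cs.map PySem.Str.strip) b).mpr hmemb.1)
        refine ⟨0, j + 1, PySem.List.index?_cons_self _ _, ?_, by omega⟩
        rw [PySem.List.index?_cons_of_ne _ hnb, hj]; rfl
      · refine (ih _).imp_of_mem ?_
        intro a b ha hb ⟨i, j, hia, hjb, hij⟩
        have hmema := (pvDedup_mem avail cs (PySem.Set.add ss (PySem.Str.strip c)) a).mp ha
        have hmemb := (pvDedup_mem avail cs (PySem.Set.add ss (PySem.Str.strip c)) b).mp hb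
        have hna : PySem.Str.strip c ≠ a := by
          rintro rfl; exact hmema.2.1 ((PySem.Set.mem_add ss _ _).mpr (Or.inr rfl))
        have hnb : PySem.Str.strip c ≠ b := by
          rintro rfl; exact hmemb.2.1 ((PySem.Set.mem_add ss _ _).mpr (Or.inr rfl))
        refine ⟨i + 1, j + 1, ?_, ?_, by omega⟩
        · rw [PySem.List.index?_cons_of_ne _ hna, hia]; rfl
        · rw [PySem.List.index?_cons_of_ne _ hnb, hjb]; rfl

-- the rank table holds exactly the first-occurrence index of each stripped candidate
theorem pvB_rankOf_get_aux (l : List String) (s : Int) (d : PySem.Dict String Int) (p : String) :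
    ((PySem.List.enumerate l s).foldl (fun d t => d.setdefault t.2 t.1) d).get? p =
      (if (d.get? p).isSome then d.get? p
       else (PySem.List.index? l p).map (fun j => s + (j : Int))) := by
  induction l generalizing s d with
  | nil =>
    rw [PySem.List.enumerate_nil]
    cases h : d.get? p <;>
      simp [h, PySem.List.index?_eq_idxOf?, List.idxOf?_nil]
  | cons x l ih =>
    rw [PySem.List.enumerate_cons]
    simp only [List.foldl_cons]
    rw [ih]
    by_cases hpx : p = x
    · subst hpx
      rw [PySem.Dict.get?_setdefault_self, PySem.List.index?_cons_self]
      cases d.get? p <;> simp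
    · rw [PySem.Dict.get?_setdefault_of_ne _ _ hpx,
        PySem.List.index?_cons_of_ne _ (fun he => hpx he.symm)]
      cases d.get? p with
      | some v => simp
      | none =>
        simp only [Option.isSome_none, Bool.false_eq_true, if_false]
        cases PySem.List.index? l p with
        | none => simp
        | some j => simp; ring

theorem pvB_rankOf_get (stripped : List String) (p : String) :
    (pvB_rankOf stripped).get? p = (PySem.List.index? stripped p).map (fun j => (j : Int)) := by
  rw [pvB_rankOf, pvB_rankOf_get_aux]
  rw [PySem.Dict.get?_empty]
  simp only [Option.isSome_none, Bool.false_eq_true, if_false]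
  cases hi : PySem.List.index? stripped p <;> simp

-- sorting the rank list recovers exactly the first-occurrence subsequence, decorated with its ranks
theorem pvRank_sorted_eq (avail cands : List String) :
    PySem.List.sorted (pvB_rank avail (cands.map PySem.Str.strip)) (fun t => t.1) =
      (pvDedup avail PySem.Set.empty cands).map
        (fun p => (((PySem.List.index? (cands.map PySem.Str.strip) p).map (fun j => (j : Int))).getD 0, p)) := by
  set stripped := cands.map PySem.Str.strip with hstr
  set d := pvDedup avail PySem.Set.empty cands with hd
  set ys := d.map (fun p => (((PySem.List.index? stripped p).map (fun j => (j : Int))).getD 0, p)) with hys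
  have hmem_d : ∀ p, p ∈ d ↔ p ∈ stripped ∧ p ≠ "" ∧ p ∈ avail := by
    intro p
    rw [hd, pvDedup_mem, ← hstr]
    simp only [PySem.Set.empty, List.not_mem_nil, not_false_eq_true, true_and]
  have hnodup_ys : ys.Nodup := by
    refine List.Nodup.map ?_ (pvDedup_nodup avail cands PySem.Set.empty)
    intro a b hab
    exact congrArg Prod.snd hab
  have hnodup_rank : (pvB_rank avail stripped).Nodup := by
    refine List.Nodup.filterMap ?_ (PySem.Set.nodup_ofList avail)
    intro a a' b hb hb'
    simp only [Option.mem_def] at hb hb'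
    by_cases ha : a = ""
    · simp [ha] at hb
    by_cases ha' : a' = ""
    · simp [ha'] at hb'
    rw [if_neg ha] at hb
    rw [if_neg ha'] at hb'
    cases h1 : (pvB_rankOf stripped).get? a with
    | none => rw [h1] at hb; exact absurd hb (by simp)
    | some i =>
      cases h2 : (pvB_rankOf stripped).get? a' with
      | none => rw [h2] at hb'; exact absurd hb' (by simp)
      | some i' =>
        rw [h1] at hb; rw [h2] at hb'
        have hba : (i, a) = b := Option.some.inj hb
        have hba' : (i', a') = b := Option.some.inj hb'
        rw [← hba] at hba'
        exact (congrArg Prod.snd hba').symm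
  have hmem : ∀ x, x ∈ ys ↔ x ∈ pvB_rank avail stripped := by
    rintro ⟨i, p⟩
    simp only [hys, List.mem_map, pvB_rank, List.mem_filterMap]
    constructor
    · rintro ⟨q, hq, heq⟩
      have hp : q = p := congrArg Prod.snd heq
      subst hp
      have hi : ((PySem.List.index? stripped q).map (fun j => (j : Int))).getD 0 = i := congrArg Prod.fst heq
      have hm := (hmem_d q).mp hq
      obtain ⟨j, hj⟩ := Option.isSome_iff_exists.mp
        ((PySem.List.index?_isSome_iff stripped q).mpr hm.1)
      refine ⟨q, (PySem.Set.mem_ofList avail q).mpr hm.2.2, ?_⟩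
      rw [if_neg hm.2.1, pvB_rankOf_get, hj]
      have hji : (j : Int) = i := by
        rw [hj] at hi; simpa using hi
      show some ((j : Int), q) = some (i, q)
      rw [hji]
    · rintro ⟨q, hq, hsome⟩
      by_cases hqe : q = ""
      · simp [hqe] at hsome
      · rw [if_neg hqe, pvB_rankOf_get] at hsome
        cases hj : PySem.List.index? stripped q with
        | none => rw [hj] at hsome; exact absurd hsome (by simp)
        | some j =>
          rw [hj] at hsome
          have heq : ((j : Int), q) = (i, p) := Option.some.inj hsome
          have hp : q = p := congrArg Prod.snd heq
          subst hp
          have hji : (j : Int) = i := congrArg Prod.fst heq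
          have hmemstr : q ∈ stripped := (PySem.List.index?_isSome_iff stripped q).mp (by rw [hj]; rfl)
          refine ⟨q, (hmem_d q).mpr ⟨hmemstr, hqe, (PySem.Set.mem_ofList avail q).mp hq⟩, ?_⟩
          rw [hj]
          show ((j : Int), q) = (i, q)
          rw [hji]
  have hperm : ys.Perm (pvB_rank avail stripped) :=
    (List.perm_ext_iff_of_nodup hnodup_ys hnodup_rank).mpr hmem
  have hpw : ys.Pairwise (fun a b => a.1 < b.1) := by
    rw [hys, List.pairwise_map]
    refine (pvDedup_pairwise avail cands PySem.Set.empty).imp ?_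
    intro a b hab
    obtain ⟨i, j, hia, hjb, hij⟩ := hab
    rw [← hstr] at hia hjb
    show ((PySem.List.index? stripped a).map (fun j => (j : Int))).getD 0 <
      ((PySem.List.index? stripped b).map (fun j => (j : Int))).getD 0
    rw [hia, hjb]
    show (i : Int) < (j : Int)
    exact_mod_cast hij
  exact PySem.List.sorted_eq_of_perm_of_pairwise_lt _ _ _ hperm hpw

-- the flat greedy loop equals B's rank-and-sort selection
theorem pvSel_eq_rank (k : Int) (avail cands : List String) (hk : ¬ k ≤ 0) :
    (pvB_sel k avail cands [] PySem.Set.empty).1 =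
      ((PySem.List.sorted (pvB_rank avail (cands.map PySem.Str.strip)) (fun t => t.1)).take k.toNat).map (fun t => t.2) := by
  rw [pvRank_sorted_eq, pvB_sel_eq_dedup k avail cands [] PySem.Set.empty (by simp; omega)]
  rw [← List.map_take, List.map_map]
  have hcomp : ((fun (t : Int × String) => t.2) ∘ fun p => (((PySem.List.index? (cands.map PySem.Str.strip) p).map (fun j => (j : Int))).getD 0, p)) = id := rfl
  rw [hcomp, List.map_id]
  simp

-- ===== VERDICT (by name: the statement is the Claim_ definition above) =====
theorem select_greedy_paths_py_spec : Claim_equal_select_greedy_paths_py := by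
  intro en k eso ess oso oss avs pbc cbp _hdom
  unfold Spec_select_greedy_paths_py
  by_cases hk : k ≤ 0
  · simp [select_greedy_paths_py, select_greedy_paths_py_alt, hk]
  · rw [pvA_eq_sel en k eso ess oso oss avs pbc cbp hk]
    simp only [select_greedy_paths_py_alt, if_neg hk]
    rw [pvSel_eq_rank k avs _ hk]
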